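-- pv_equiv track=rewrite | github.com/nyakoru/scrapper | teststuf-main/command/correction.py | reverse_correction
-- ===== SOURCE A (Python) =====
-- def reverse_correction(corrected_filename):
--     placeholder_map = {
--         '__lt__': '<',
--         '__gt__': '>',
--         '__colon__': ':',
--         '__quote__': '"',
--         '__slash__': '/',
--         '__backslash__': '\\',
--         '__pipe__': '|',
--         '__question__': '?',
--         '__asterisk__': '*'
--     }
--
--     original = corrected_filename
--     for placeholder, char in placeholder_map.items():
--         original = original.replace(placeholder, char)
--     return original
-- ===== SOURCE B (Python) =====
-- def reverse_correction(corrected_filename):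
--     names = ['lt', 'gt', 'colon', 'quote', 'slash', 'backslash',
--              'pipe', 'question', 'asterisk']
--     placeholder_map = {'__%s__' % name: char
--                        for name, char in zip(names, '<>:"/\\|?*')}
--     out = []
--     i = 0
--     n = len(corrected_filename)
--     while i < n:
--         for placeholder, char in placeholder_map.items():
--             if corrected_filename.startswith(placeholder, i):
--                 out.append(char)
--                 i += len(placeholder)
--                 break
--         else:
--             out.append(corrected_filename[i])
--             i += 1
--     return ''.join(out)
-- ===== Notes on version B (the rewrite author's own statement) =====
-- stated objective: alternative
-- what changed: A makes nine sequential full-string str.replace passes (one per placeholder); B builds the map once and does a single left-to-right scan over the string, matching a placeholder at each position and emitting its character, so the string is traversed once and no intermediate strings are built.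
-- outside the precondition, e.g. on reverse_correction('__quote__colon__'): A returns '__quote:', B returns '"colon__'
import Mathlib
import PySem

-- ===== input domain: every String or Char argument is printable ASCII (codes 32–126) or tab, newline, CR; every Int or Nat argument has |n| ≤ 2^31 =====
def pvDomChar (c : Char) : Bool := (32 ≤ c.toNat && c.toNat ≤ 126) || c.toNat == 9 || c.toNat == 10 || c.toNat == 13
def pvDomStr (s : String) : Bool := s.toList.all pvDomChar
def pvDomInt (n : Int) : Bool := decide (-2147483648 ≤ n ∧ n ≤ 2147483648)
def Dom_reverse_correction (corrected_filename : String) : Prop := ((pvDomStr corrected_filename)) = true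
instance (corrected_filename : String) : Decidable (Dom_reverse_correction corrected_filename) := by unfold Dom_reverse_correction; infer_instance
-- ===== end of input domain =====

-- B replaces A's nine sequential full-string replace passes by ONE left-to-right scan
-- (objective: alternative single-pass algorithm; equal return value on Pre_, which
-- excludes strings where occurrences of two distinct placeholders overlap).

-- ===== PORT A =====
def pvPlaceholderMap : PySem.Dict String String :=
  PySem.Dict.ofList
    [("__lt__", "<"), ("__gt__", ">"), ("__colon__", ":"), ("__quote__", "\""),
     ("__slash__", "/"), ("__backslash__", "\\"), ("__pipe__", "|"),
     ("__question__", "?"), ("__asterisk__", "*")]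

def reverse_correction (corrected_filename : String) : String :=
  (pvPlaceholderMap.items).foldl
    (fun original pc => PySem.Str.replace original pc.1 pc.2) corrected_filename

-- ===== PORT B =====
-- the placeholder map, in the same (insertion) order, as (key chars, replacement char)
def pvKeys : List (List Char × Char) :=
  (List.zip
      [['l','t'], ['g','t'], ['c','o','l','o','n'], ['q','u','o','t','e'],
       ['s','l','a','s','h'], ['b','a','c','k','s','l','a','s','h'],
       ['p','i','p','e'], ['q','u','e','s','t','i','o','n'],
       ['a','s','t','e','r','i','s','k']]
      ['<', '>', ':', '"', '/', '\\', '|', '?', '*']).map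
    (fun p => ('_' :: '_' :: p.1 ++ ['_', '_'], p.2))

-- the single left-to-right pass of Source B: at each position try the placeholders,
-- on a match emit the character and jump over the placeholder, else copy one char
def pvScan (l : List Char) : List Char :=
  match l with
  | [] => []
  | c :: t =>
    match pvKeys.find? (fun p => p.1.isPrefixOf (c :: t)) with
    | some p => p.2 :: pvScan (List.drop (p.1.length - 1) t)
    | none => c :: pvScan t
termination_by l.length
decreasing_by all_goals simp only [List.length_cons, List.length_drop]; omega

def reverse_correction_alt (corrected_filename : String) : String :=
  String.ofList (pvScan corrected_filename.toList)

-- ===== PRECONDITION & SPEC =====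
-- Pre_ excludes strings in which occurrences of two DISTINCT placeholders overlap
-- (e.g. "__quote__colon__"): there A's result depends on the accidental order of the
-- nine replace passes (the dict order), an artefact nobody would specify either way.
def pvNoOv (l : List Char) : Prop :=
  ∀ p1 ∈ pvKeys, ∀ p2 ∈ pvKeys, p1.1 ≠ p2.1 →
    ∀ i, i ≤ l.length → ∀ j, j ≤ l.length →
      p1.1.isPrefixOf (l.drop i) = true → p2.1.isPrefixOf (l.drop j) = true →
      i ≤ j → i + p1.1.length ≤ j

def Pre_reverse_correction (corrected_filename : String) : Prop :=
  pvNoOv corrected_filename.toList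

instance (corrected_filename : String) : Decidable (Pre_reverse_correction corrected_filename) := by
  unfold Pre_reverse_correction pvNoOv; infer_instance

def pvWitness_reverse_correction : String := "a__lt__b__colon__"

def Spec_reverse_correction (corrected_filename : String) (out : String) : Prop :=
  out = reverse_correction_alt corrected_filename

instance (corrected_filename : String) (out : String) : Decidable (Spec_reverse_correction corrected_filename out) := by
  unfold Spec_reverse_correction; infer_instance

-- ===== CLAIM (what is proved, stated in full; the proofs are below) =====
def Claim_equal_reverse_correction : Prop :=
  ∀ (corrected_filename : String), Dom_reverse_correction corrected_filename →
    Pre_reverse_correction corrected_filename →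
    Spec_reverse_correction corrected_filename (reverse_correction corrected_filename)

-- ===== LEMMAS AND PROOFS =====

-- structural model of Python's str.replace (leftmost, non-overlapping, greedy)
def pvRep (old new : List Char) (l : List Char) : List Char :=
  match l with
  | [] => []
  | c :: t =>
    if old.isPrefixOf (c :: t) then new ++ pvRep old new (List.drop (old.length - 1) t)
    else c :: pvRep old new t
termination_by l.length
decreasing_by all_goals simp only [List.length_cons, List.length_drop]; omega

def pvStep (x : List Char) (p : List Char × Char) : List Char := pvRep p.1 [p.2] x

-- chars that may occur in a placeholder key
def pvKeyChar (c : Char) : Bool := c == '_' || (decide ('a' ≤ c) && decide (c ≤ 'z'))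

lemma pvKeys_facts : ∀ p ∈ pvKeys, (p.1 ≠ [] ∧ p.1.all pvKeyChar = true) ∧ pvKeyChar p.2 = false := by
  decide

lemma pvKeys_nodup : (pvKeys.map Prod.fst).Nodup := by decide

lemma pvRep_nil (old new : List Char) : pvRep old new [] = [] := by simp [pvRep]

lemma pvRep_cons_pos (old new : List Char) (c : Char) (t : List Char)
    (h : old.isPrefixOf (c :: t) = true) :
    pvRep old new (c :: t) = new ++ pvRep old new (List.drop (old.length - 1) t) := by
  rw [pvRep]; simp [h]

lemma pvRep_cons_neg (old new : List Char) (c : Char) (t : List Char)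
    (h : ¬ old.isPrefixOf (c :: t) = true) :
    pvRep old new (c :: t) = c :: pvRep old new t := by
  rw [pvRep]; simp [h]

lemma pv_go_eq (old new : List Char) (h : old ≠ []) :
    ∀ fuel l acc, l.length ≤ fuel →
      PySem.Chars.replace.go old new fuel l acc = acc.reverse ++ pvRep old new l := by
  intro fuel
  induction fuel with
  | zero =>
    intro l acc hl
    have hnil : l = [] := by cases l <;> simp_all
    subst hnil
    simp [PySem.Chars.replace.go, pvRep_nil]
  | succ n ih =>
    intro l acc hl
    cases l with
    | nil => simp [PySem.Chars.replace.go, pvRep_nil]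
    | cons c t =>
      rw [PySem.Chars.replace.go]
      simp only [List.length_cons] at hl
      by_cases hp : old.isPrefixOf (c :: t) = true
      · simp only [hp, if_true]
        obtain ⟨k, hk⟩ : ∃ k, old.length = k + 1 := by
          cases old with
          | nil => simp_all
          | cons a b => exact ⟨b.length, by simp⟩
        rw [hk, List.drop_succ_cons]
        have harg : (List.drop k t).length ≤ n := by
          simp only [List.length_drop]; omega
        rw [ih (List.drop k t) (new.reverse ++ acc) harg]
        rw [pvRep_cons_pos _ _ _ _ hp, hk]
        simp
      · simp only [hp]
        have harg : t.length ≤ n := by omega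
        rw [ih t (c :: acc) harg]
        rw [pvRep_cons_neg _ _ _ _ hp]
        simp

lemma pv_replace_eq_pvRep (old new l : List Char) (h : old ≠ []) :
    PySem.Chars.replace l old new = pvRep old new l := by
  rw [PySem.Chars.replace]
  simp only [List.isEmpty_iff, h, if_false]
  simpa using pv_go_eq old new h l.length l [] le_rfl

-- a prefix of a replaced string made only of key characters was already a prefix:
-- the replacement character is not a key character, so such a prefix never crosses it
lemma pv_prefix_through_pvRep (k : List Char) (rc : Char) (hrc : pvKeyChar rc = false) :
    ∀ n t w, t.length ≤ n → w <+: pvRep k [rc] t → w.all pvKeyChar = true → w <+: t := by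
  intro n
  induction n with
  | zero =>
    intro t w ht hw _
    have hnil : t = [] := by cases t <;> simp_all
    subst hnil
    rw [pvRep_nil] at hw
    simp [List.prefix_nil.mp hw]
  | succ n ih =>
    intro t w ht hw hall
    cases t with
    | nil =>
      rw [pvRep_nil] at hw
      simp [List.prefix_nil.mp hw]
    | cons c t' =>
      by_cases hp : k.isPrefixOf (c :: t') = true
      · rw [pvRep_cons_pos _ _ _ _ hp] at hw
        cases w with
        | nil => exact List.nil_prefix
        | cons a w' =>
          rw [List.cons_append, List.nil_append, List.cons_prefix_cons] at hw
          obtain ⟨rfl, _⟩ := hw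
          simp only [List.all_cons, Bool.and_eq_true] at hall
          rw [hall.1] at hrc
          exact absurd hrc (by simp)
      · rw [pvRep_cons_neg _ _ _ _ hp] at hw
        cases w with
        | nil => exact List.nil_prefix
        | cons a w' =>
          rw [List.cons_prefix_cons] at hw
          obtain ⟨rfl, hw'⟩ := hw
          simp only [List.all_cons, Bool.and_eq_true] at hall
          have := ih t' w' (by simp only [List.length_cons] at ht; omega) hw' hall.2
          exact List.cons_prefix_cons.mpr ⟨rfl, this⟩

-- if no key matches at the head, the whole fold commutes with the head character
lemma pv_fold_cons_aux (c : Char) :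
    ∀ (L : List (List Char × Char)), (∀ p ∈ L, p ∈ pvKeys) →
      ∀ t, (∀ p ∈ pvKeys, ¬ p.1 <+: (c :: t)) →
        List.foldl pvStep (c :: t) L = c :: List.foldl pvStep t L := by
  intro L
  induction L with
  | nil => intro _ t _; simp
  | cons q L' ih =>
    intro hmem t hno
    have hqK : q ∈ pvKeys := hmem q (by simp)
    have hq1 : ¬ q.1.isPrefixOf (c :: t) = true := by
      rw [List.isPrefixOf_iff_prefix]; exact hno q hqK
    have hstep : pvStep (c :: t) q = c :: pvStep t q := pvRep_cons_neg _ _ _ _ hq1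
    have hpres : ∀ p ∈ pvKeys, ¬ p.1 <+: (c :: pvStep t q) := by
      intro p hpK hpre
      have hfacts := pvKeys_facts p hpK
      cases hp1 : p.1 with
      | nil => exact hfacts.1.1 hp1
      | cons a w =>
        rw [hp1, List.cons_prefix_cons] at hpre
        obtain ⟨rfl, hw⟩ := hpre
        have hallw : w.all pvKeyChar = true := by
          have := hfacts.1.2; rw [hp1] at this; simp only [List.all_cons, Bool.and_eq_true] at this
          exact this.2
        have hqf := pvKeys_facts q hqK
        have : w <+: t := pv_prefix_through_pvRep q.1 q.2 hqf.2 t.length t w le_rfl hw hallw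
        exact hno p hpK (by rw [hp1]; exact List.cons_prefix_cons.mpr ⟨rfl, this⟩)
    calc List.foldl pvStep (c :: t) (q :: L')
        = List.foldl pvStep (c :: pvStep t q) L' := by simp [List.foldl, hstep]
      _ = c :: List.foldl pvStep (pvStep t q) L' :=
          ih (fun p hp => hmem p (by simp [hp])) (pvStep t q) hpres
      _ = c :: List.foldl pvStep t (q :: L') := by simp [List.foldl]

lemma pv_prefix_append_cases {l A B : List Char} (h : l <+: A ++ B) :
    l <+: A ∨ ∃ w, l = A ++ w ∧ w <+: B := by
  induction A generalizing l with
  | nil => exact Or.inr ⟨l, by simpa using h⟩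
  | cons a A' ih =>
    cases l with
    | nil => exact Or.inl List.nil_prefix
    | cons x l' =>
      rw [List.cons_append, List.cons_prefix_cons] at h
      obtain ⟨rfl, h'⟩ := h
      rcases ih h' with h1 | ⟨w, rfl, hw⟩
      · exact Or.inl (List.cons_prefix_cons.mpr ⟨rfl, h1⟩)
      · exact Or.inr ⟨w, by simp, hw⟩

-- a replace pass with no match starting inside the prefix region k leaves k alone
lemma pv_pvRep_append_of_no_match (q : List Char) (rc : Char) :
    ∀ (k U : List Char), (∀ j, j < k.length → ¬ q <+: (k ++ U).drop j) →
      pvRep q [rc] (k ++ U) = k ++ pvRep q [rc] U := by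
  intro k
  induction k with
  | nil => intro U _; simp
  | cons c k' ih =>
    intro U h
    have h0 : ¬ q.isPrefixOf (c :: (k' ++ U)) = true := by
      rw [List.isPrefixOf_iff_prefix]
      simpa using h 0 (by simp)
    rw [List.cons_append, pvRep_cons_neg _ _ _ _ h0,
        ih U (fun j hj => by simpa using h (j + 1) (by simp; omega))]
    simp

-- ===== the match case: processing keys over (k ++ u) with k's occurrence intact =====

-- prefix-transfer relation: every key-character prefix of u' is a prefix of u
def pvPT (u u' : List Char) : Prop :=
  ∀ w, w <+: u' → w.all pvKeyChar = true → w <+: u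

lemma pvPT_step {u u' : List Char} (q : List Char × Char) (hq : q ∈ pvKeys)
    (h : pvPT u u') : pvPT u (pvStep u' q) := by
  intro w hw hall
  exact h w (pv_prefix_through_pvRep q.1 q.2 (pvKeys_facts q hq).2 u'.length u' w le_rfl hw hall) hall

lemma pv_fold_prefix_region (k u : List Char)
    (hno : ∀ p ∈ pvKeys, p.1 ≠ k → ∀ j, j < k.length → ¬ p.1 <+: (k ++ u).drop j) :
    ∀ (L : List (List Char × Char)), (∀ p ∈ L, p ∈ pvKeys ∧ p.1 ≠ k) →
      ∀ u', pvPT u u' → List.foldl pvStep (k ++ u') L = k ++ List.foldl pvStep u' L := by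
  intro L
  induction L with
  | nil => intro _ u' _; simp
  | cons q L' ih =>
    intro hmem u' hPT
    obtain ⟨hqK, hqne⟩ := hmem q (by simp)
    have hnomatch : ∀ j, j < k.length → ¬ q.1 <+: (k ++ u').drop j := by
      intro j hj hpre
      rw [List.drop_append_of_le_length (le_of_lt hj)] at hpre
      have hdropu : (k ++ u).drop j = k.drop j ++ u := List.drop_append_of_le_length (le_of_lt hj)
      rcases pv_prefix_append_cases hpre with h1 | ⟨w, heq, hw⟩
      · exact hno q hqK hqne j hj (by rw [hdropu]; exact h1.trans (List.prefix_append _ _))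
      · have hallw : w.all pvKeyChar = true := by
          have := (pvKeys_facts q hqK).1.2
          rw [heq] at this
          simp only [List.all_append, Bool.and_eq_true] at this
          exact this.2
        have hwu : w <+: u := hPT w hw hallw
        exact hno q hqK hqne j hj
          (by rw [hdropu, heq]; exact (List.prefix_append_right_inj _).mpr hwu)
    have hstep : pvStep (k ++ u') q = k ++ pvStep u' q :=
      pv_pvRep_append_of_no_match q.1 q.2 k u' hnomatch
    calc List.foldl pvStep (k ++ u') (q :: L')
        = List.foldl pvStep (k ++ pvStep u' q) L' := by simp [List.foldl, hstep]
      _ = k ++ List.foldl pvStep (pvStep u' q) L' :=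
          ih (fun p hp => hmem p (by simp [hp])) (pvStep u' q) (pvPT_step q hqK hPT)
      _ = k ++ List.foldl pvStep u' (q :: L') := by simp [List.foldl]

-- a non-key head character is never touched by the remaining passes
lemma pv_fold_cons_bad (rc : Char) (hrc : pvKeyChar rc = false) :
    ∀ (L : List (List Char × Char)), (∀ p ∈ L, p ∈ pvKeys) →
      ∀ X, List.foldl pvStep (rc :: X) L = rc :: List.foldl pvStep X L := by
  intro L
  induction L with
  | nil => intro _ X; simp
  | cons q L' ih =>
    intro hmem X
    have hqK : q ∈ pvKeys := hmem q (by simp)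
    have hfacts := pvKeys_facts q hqK
    have hq1 : ¬ q.1.isPrefixOf (rc :: X) = true := by
      rw [List.isPrefixOf_iff_prefix]
      intro hpre
      cases hp1 : q.1 with
      | nil => exact hfacts.1.1 hp1
      | cons a w =>
        rw [hp1, List.cons_prefix_cons] at hpre
        obtain ⟨rfl, _⟩ := hpre
        have := hfacts.1.2
        rw [hp1] at this
        simp only [List.all_cons, Bool.and_eq_true] at this
        rw [this.1] at hrc
        exact absurd hrc (by simp)
    have hstep : pvStep (rc :: X) q = rc :: pvStep X q := pvRep_cons_neg _ _ _ _ hq1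
    calc List.foldl pvStep (rc :: X) (q :: L')
        = List.foldl pvStep (rc :: pvStep X q) L' := by simp [List.foldl, hstep]
      _ = rc :: List.foldl pvStep (pvStep X q) L' := ih (fun p hp => hmem p (by simp [hp])) _
      _ = rc :: List.foldl pvStep X (q :: L') := by simp [List.foldl]

lemma pv_fold_match (k : List Char) (kc : Char) (u : List Char)
    (hmem : (k, kc) ∈ pvKeys)
    (hno : ∀ p ∈ pvKeys, p.1 ≠ k → ∀ j, j < k.length → ¬ p.1 <+: (k ++ u).drop j) :
    List.foldl pvStep (k ++ u) pvKeys = kc :: List.foldl pvStep u pvKeys := by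
  obtain ⟨L1, L2, hsplit⟩ := List.append_of_mem hmem
  have hk_ne : k ≠ [] := ((pvKeys_facts (k, kc) hmem).1).1
  have hkc : pvKeyChar kc = false := (pvKeys_facts (k, kc) hmem).2
  have hL1K : ∀ p ∈ L1, p ∈ pvKeys := fun p hp => by rw [hsplit]; simp [hp]
  have hL2K : ∀ p ∈ L2, p ∈ pvKeys := fun p hp => by rw [hsplit]; simp [hp]
  have hL1ne : ∀ p ∈ L1, p.1 ≠ k := by
    intro p hp heq
    have hnd := pvKeys_nodup
    rw [hsplit, List.map_append] at hnd
    have hdisj := List.disjoint_of_nodup_append hnd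
    exact (List.disjoint_left.mp hdisj (List.mem_map_of_mem hp)) (by subst heq; simp)
  have hphase1 : List.foldl pvStep (k ++ u) L1 = k ++ List.foldl pvStep u L1 :=
    pv_fold_prefix_region k u hno L1 (fun p hp => ⟨hL1K p hp, hL1ne p hp⟩) u
      (fun w hw _ => hw)
  set u1 := List.foldl pvStep u L1 with hu1
  have hkstep : pvStep (k ++ u1) (k, kc) = kc :: pvRep k [kc] u1 := by
    cases k with
    | nil => exact absurd rfl hk_ne
    | cons c k'' =>
      have hp : (c :: k'').isPrefixOf (c :: (k'' ++ u1)) = true := by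
        rw [List.isPrefixOf_iff_prefix, ← List.cons_append]
        exact List.prefix_append _ _
      have hstep := pvRep_cons_pos (c :: k'') [kc] c (k'' ++ u1) hp
      show pvRep (c :: k'') [kc] ((c :: k'') ++ u1) = kc :: pvRep (c :: k'') [kc] u1
      rw [List.cons_append, hstep]
      simp only [List.length_cons, Nat.add_sub_cancel, List.drop_left, List.singleton_append]
  have hphase3 : List.foldl pvStep (kc :: pvRep k [kc] u1) L2
      = kc :: List.foldl pvStep (pvRep k [kc] u1) L2 :=
    pv_fold_cons_bad kc hkc L2 hL2K _
  rw [hsplit, List.foldl_append, hphase1]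
  show List.foldl pvStep (pvStep (k ++ u1) (k, kc)) L2 = _
  rw [hkstep, hphase3, List.foldl_append]
  rfl

-- ===== bookkeeping about pvNoOv =====

lemma pvNoOv_nil : pvNoOv [] := by
  intro p1 h1 p2 h2 _ i hi j hj hpre1 _ _
  have : i = 0 := Nat.le_zero.mp hi
  subst this
  rw [List.isPrefixOf_iff_prefix] at hpre1
  exact absurd (List.prefix_nil.mp hpre1) ((pvKeys_facts p1 h1).1).1

lemma pvNoOv_tail (c : Char) (t : List Char) (h : pvNoOv (c :: t)) : pvNoOv t := by
  intro p1 h1 p2 h2 hne i hi j hj hpre1 hpre2 hij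
  have := h p1 h1 p2 h2 hne (i + 1) (by simp; omega) (j + 1) (by simp; omega)
    (by rwa [List.drop_succ_cons]) (by rwa [List.drop_succ_cons]) (by omega)
  omega

lemma pvNoOv_drop (n : ℕ) : ∀ l, pvNoOv l → pvNoOv (l.drop n) := by
  induction n with
  | zero => intro l h; simpa using h
  | succ m ih =>
    intro l h
    cases l with
    | nil => simpa using pvNoOv_nil
    | cons c t => rw [List.drop_succ_cons]; exact ih t (pvNoOv_tail c t h)

-- ===== main induction: the nine-pass fold equals the single pass, given pvNoOv =====

lemma pv_fold_nil : List.foldl pvStep [] pvKeys = [] := by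
  have : ∀ (L : List (List Char × Char)), List.foldl pvStep [] L = [] := by
    intro L
    induction L with
    | nil => rfl
    | cons q L' ih => simpa [List.foldl, pvStep, pvRep_nil] using ih
  exact this pvKeys

lemma pv_main : ∀ n l, l.length ≤ n → pvNoOv l →
    List.foldl pvStep l pvKeys = pvScan l := by
  intro n
  induction n with
  | zero =>
    intro l hl _
    have : l = [] := by cases l <;> simp_all
    subst this
    rw [pv_fold_nil, pvScan]
  | succ n ih =>
    intro l hl hno
    cases l with
    | nil => rw [pv_fold_nil, pvScan]
    | cons c t =>
      cases hfind : pvKeys.find? (fun p => p.1.isPrefixOf (c :: t)) with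
      | none =>
        have hnomatch : ∀ p ∈ pvKeys, ¬ p.1 <+: (c :: t) := by
          intro p hp
          have := List.find?_eq_none.mp hfind p hp
          rw [List.isPrefixOf_iff_prefix] at this
          simpa using this
        rw [pv_fold_cons_aux c pvKeys (fun _ hp => hp) t hnomatch]
        rw [pvScan, hfind]
        rw [ih t (by simp at hl; omega) (pvNoOv_tail c t hno)]
      | some p =>
        have hpK : p ∈ pvKeys := List.mem_of_find?_eq_some hfind
        have hppre : p.1.isPrefixOf (c :: t) = true := by
          have := List.find?_some hfind
          simpa using this
        have hfacts := pvKeys_facts p hpK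
        obtain ⟨u, hu⟩ : ∃ u, p.1 ++ u = c :: t :=
          (List.isPrefixOf_iff_prefix.mp hppre)
        have hno' : ∀ q ∈ pvKeys, q.1 ≠ p.1 → ∀ j, j < p.1.length →
            ¬ q.1 <+: (p.1 ++ u).drop j := by
          intro q hqK hqne j hj hpre
          rw [hu] at hpre
          have hjlen : j ≤ (c :: t).length := by
            rw [← hu]; simp only [List.length_append]; omega
          have h0 : p.1.isPrefixOf (List.drop 0 (c :: t)) = true := by
            simpa using hppre
          have hj' : q.1.isPrefixOf (List.drop j (c :: t)) = true := by
            rw [List.isPrefixOf_iff_prefix]; exact hpre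
          have := hno p hpK q hqK (fun h => hqne h.symm) 0 (by omega)
            j hjlen h0 hj' (by omega)
          omega
        have hmatch := pv_fold_match p.1 p.2 u (by simpa using hpK) hno'
        have hscan : pvScan (c :: t) = p.2 :: pvScan (List.drop (p.1.length - 1) t) := by
          rw [pvScan, hfind]
        rw [← hu, hmatch, hu, hscan]
        have hdrop : List.drop (p.1.length - 1) t = u := by
          obtain ⟨kl, hkl⟩ : ∃ kl, p.1.length = kl + 1 := by
            cases hp1 : p.1 with
            | nil => exact absurd hp1 hfacts.1.1
            | cons a b => exact ⟨b.length, by simp⟩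
          have : List.drop p.1.length (c :: t) = u := by
            rw [← hu, List.drop_append_of_le_length (le_refl p.1.length)]
            simp
          rw [hkl, List.drop_succ_cons] at this
          simpa [hkl] using this
        rw [hdrop]
        have hlenu : u.length ≤ n := by
          have : (p.1 ++ u).length = t.length + 1 := by rw [hu]; simp
          simp only [List.length_append] at this
          have hk1 : 1 ≤ p.1.length := by
            cases hp1 : p.1 with
            | nil => exact absurd hp1 hfacts.1.1
            | cons a b => simp
          simp only [List.length_cons] at hl
          omega
        have hnou : pvNoOv u := by
          have := pvNoOv_drop p.1.length (c :: t) hno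
          rw [← hu, List.drop_append_of_le_length (le_refl p.1.length)] at this
          simpa using this
        rw [ih u hlenu hnou]

-- ===== bridging the String-level port A to the list-level fold =====

lemma pv_fold_str (L : List (String × String)) :
    ∀ s : String,
      (L.foldl (fun o pc => PySem.Str.replace o pc.1 pc.2) s).toList =
        L.foldl (fun x pc => PySem.Chars.replace x pc.1.toList pc.2.toList) s.toList := by
  induction L with
  | nil => intro s; rfl
  | cons q L' ih =>
    intro s
    simp only [List.foldl]
    rw [ih, PySem.Str.toList_replace]

lemma pv_portA_eq_fold (s : String) :
    (reverse_correction s).toList = List.foldl pvStep s.toList pvKeys := by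
  unfold reverse_correction
  rw [pv_fold_str]
  have hlit : List.foldl (fun x pc => PySem.Chars.replace x pc.1.toList pc.2.toList)
      s.toList pvPlaceholderMap.items =
      List.foldl (fun x p => PySem.Chars.replace x p.1 [p.2]) s.toList pvKeys := rfl
  rw [hlit]
  have : ∀ (L : List (List Char × Char)), (∀ p ∈ L, p.1 ≠ []) → ∀ x,
      List.foldl (fun x p => PySem.Chars.replace x p.1 [p.2]) x L = List.foldl pvStep x L := by
    intro L
    induction L with
    | nil => intro _ x; rfl
    | cons q L' ih =>
      intro hne x
      simp only [List.foldl]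
      rw [pv_replace_eq_pvRep _ _ _ (hne q (by simp)), ih (fun p hp => hne p (by simp [hp]))]
      rfl
  exact this pvKeys (fun p hp => ((pvKeys_facts p hp).1).1) s.toList

-- ===== VERDICT (by name: the statement is the Claim_ definition above) =====
theorem reverse_correction_spec : Claim_equal_reverse_correction := by
  intro s _ hpre
  unfold Spec_reverse_correction reverse_correction_alt
  have h1 : (reverse_correction s).toList = pvScan s.toList := by
    rw [pv_portA_eq_fold]
    exact pv_main s.toList.length s.toList le_rfl hpre
  have h2 := congrArg String.ofList h1
  rw [String.ofList_toList] at h2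
  exact h2
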